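-- pv_equiv track=rewrite | github.com/barswebadmin/BigAppleRecSports | backend/modules/integrations/shopify/builders/shopify_request_builders.py | _expand_to_scalar_leaves
-- ===== SOURCE A (Python) =====
-- from typing import Dict, Any, List, Union, Optional, Set, Tuple
--
-- def _expand_to_scalar_leaves(
--     requested_gql: List[str], scalar_leaves: List[str]
-- ) -> List[str]:
--     if not requested_gql:
--         return scalar_leaves
--     expanded: List[str] = []
--     for p in requested_gql:
--         if p in scalar_leaves:
--             expanded.append(p)
--         else:
--             prefix = f"{p}."
--             expanded.extend([leaf for leaf in scalar_leaves if leaf.startswith(prefix)])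
--     return sorted(set(expanded))
-- ===== SOURCE B (Python) =====
-- def _expand_to_scalar_leaves(requested_gql, scalar_leaves):
--     if not requested_gql:
--         return scalar_leaves
--     leaf_set = set(scalar_leaves)
--     requested_set = set(requested_gql)
--     prefixes = [p + "." for p in requested_gql if p not in leaf_set]
--     return [leaf for leaf in sorted(leaf_set)
--             if leaf in requested_set or any(leaf.startswith(q) for q in prefixes)]
-- ===== Notes on version B (the rewrite author's own statement) =====
-- stated objective: alternative
-- what changed: Leaf-major instead of request-major: B precomputes hash sets and the non-leaf prefixes once, then emits the answer in one filter pass over the sorted deduplicated leaves, so A's per-request O(L) list-membership scan and the final sorted(set(...)) pass disappear.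
import Mathlib
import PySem

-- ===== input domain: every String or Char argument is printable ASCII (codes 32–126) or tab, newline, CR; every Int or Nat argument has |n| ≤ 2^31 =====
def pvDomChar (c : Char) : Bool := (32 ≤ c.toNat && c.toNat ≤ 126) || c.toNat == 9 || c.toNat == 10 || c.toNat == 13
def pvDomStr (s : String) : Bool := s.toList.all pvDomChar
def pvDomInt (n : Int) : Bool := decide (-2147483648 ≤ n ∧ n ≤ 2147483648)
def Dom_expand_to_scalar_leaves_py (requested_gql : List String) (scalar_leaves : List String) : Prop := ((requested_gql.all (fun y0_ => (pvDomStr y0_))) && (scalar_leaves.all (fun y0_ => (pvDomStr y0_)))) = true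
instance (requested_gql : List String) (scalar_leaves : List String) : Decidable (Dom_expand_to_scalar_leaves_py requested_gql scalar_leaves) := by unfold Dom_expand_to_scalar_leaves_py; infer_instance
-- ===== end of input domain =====

-- B restructures A's request-major accumulation into one filter pass over the
-- sorted deduplicated leaves, with the requested set and non-leaf prefixes
-- precomputed once (objective: alternative; same return value).

-- ===== PORT A =====
def expand_to_scalar_leaves_py (requested_gql : List String) (scalar_leaves : List String) : List String :=
  if requested_gql = [] then scalar_leaves
  else
    let expanded : List String :=
      requested_gql.foldl (fun acc p =>
        if p ∈ scalar_leaves then acc ++ [p]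
        else acc ++ scalar_leaves.filter (fun leaf => PySem.Str.startswith leaf (p ++ "."))) []
    PySem.List.sorted (PySem.Set.ofList expanded) (fun x => x) false

-- ===== PORT B =====
def expand_to_scalar_leaves_py_alt (requested_gql : List String) (scalar_leaves : List String) : List String :=
  if requested_gql = [] then scalar_leaves
  else
    let leafSet : PySem.Set String := PySem.Set.ofList scalar_leaves
    let requestedSet : PySem.Set String := PySem.Set.ofList requested_gql
    let prefixes : List String :=
      (requested_gql.filter (fun p => !(PySem.Set.contains leafSet p))).map (fun p => p ++ ".")
    (PySem.List.sorted leafSet (fun x => x) false).filter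
      (fun leaf => PySem.Set.contains requestedSet leaf
        || prefixes.any (fun q => PySem.Str.startswith leaf q))

-- ===== PRECONDITION & SPEC =====
def Spec_expand_to_scalar_leaves_py (requested_gql : List String) (scalar_leaves : List String) (out : List String) : Prop := out = expand_to_scalar_leaves_py_alt requested_gql scalar_leaves
instance (requested_gql : List String) (scalar_leaves : List String) (out : List String) : Decidable (Spec_expand_to_scalar_leaves_py requested_gql scalar_leaves out) := by unfold Spec_expand_to_scalar_leaves_py; infer_instance

-- ===== CLAIM (what is proved, stated in full; the proofs are below) =====
def Claim_equal_expand_to_scalar_leaves_py : Prop := ∀ (requested_gql : List String) (scalar_leaves : List String), Dom_expand_to_scalar_leaves_py requested_gql scalar_leaves → Spec_expand_to_scalar_leaves_py requested_gql scalar_leaves (expand_to_scalar_leaves_py requested_gql scalar_leaves)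

-- ===== LEMMAS AND PROOFS =====

-- A's per-request contribution: the request itself if it is a leaf, else all leaves under it.
def pvContrib (scalar_leaves : List String) (p : String) : List String :=
  if p ∈ scalar_leaves then [p]
  else scalar_leaves.filter (fun leaf => PySem.Str.startswith leaf (p ++ "."))

lemma pvExpandedEq (requested_gql scalar_leaves : List String) :
    requested_gql.foldl (fun acc p =>
        if p ∈ scalar_leaves then acc ++ [p]
        else acc ++ scalar_leaves.filter (fun leaf => PySem.Str.startswith leaf (p ++ "."))) [] =
      requested_gql.flatMap (pvContrib scalar_leaves) := by
  have h : (fun (acc : List String) p =>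
        if p ∈ scalar_leaves then acc ++ [p]
        else acc ++ scalar_leaves.filter (fun leaf => PySem.Str.startswith leaf (p ++ "."))) =
      (fun acc p => acc ++ pvContrib scalar_leaves p) := by
    funext acc p
    unfold pvContrib
    split <;> rfl
  rw [h, PySem.List.foldl_append_eq_flatMap]
  simp

lemma pvMemExpanded (requested_gql scalar_leaves : List String) (x : String) :
    x ∈ requested_gql.flatMap (pvContrib scalar_leaves) ↔
      x ∈ scalar_leaves ∧ (x ∈ requested_gql ∨
        ∃ p ∈ requested_gql, p ∉ scalar_leaves ∧ PySem.Str.startswith x (p ++ ".") = true) := by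
  simp only [List.mem_flatMap]
  constructor
  · rintro ⟨p, hp, hx⟩
    unfold pvContrib at hx
    split at hx
    · rename_i hpl
      simp at hx
      subst hx
      exact ⟨hpl, Or.inl hp⟩
    · rename_i hpl
      simp only [List.mem_filter] at hx
      exact ⟨hx.1, Or.inr ⟨p, hp, hpl, hx.2⟩⟩
  · rintro ⟨hxl, hreq | ⟨p, hp, hpl, hsw⟩⟩
    · exact ⟨x, hreq, by unfold pvContrib; simp [hxl]⟩
    · refine ⟨p, hp, ?_⟩
      unfold pvContrib
      rw [if_neg hpl, List.mem_filter]
      exact ⟨hxl, hsw⟩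

-- B's filter predicate holds exactly on the leaves A collects.
lemma pvPredIff (requested_gql scalar_leaves : List String) (x : String) :
    (PySem.Set.contains (PySem.Set.ofList requested_gql) x
        || ((requested_gql.filter (fun p => !(PySem.Set.contains (PySem.Set.ofList scalar_leaves) p))).map
              (fun p => p ++ ".")).any (fun q => PySem.Str.startswith x q)) = true ↔
      (x ∈ requested_gql ∨
        ∃ p ∈ requested_gql, p ∉ scalar_leaves ∧ PySem.Str.startswith x (p ++ ".") = true) := by
  simp [PySem.Set.mem_ofList, List.any_eq_true]

-- ===== VERDICT (by name: the statement is the Claim_ definition above) =====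
theorem expand_to_scalar_leaves_py_spec : Claim_equal_expand_to_scalar_leaves_py := by
  intro requested_gql scalar_leaves _
  unfold Spec_expand_to_scalar_leaves_py expand_to_scalar_leaves_py expand_to_scalar_leaves_py_alt
  by_cases hreq : requested_gql = []
  · simp [hreq]
  · simp only [hreq, if_false]
    rw [pvExpandedEq]
    set E := requested_gql.flatMap (pvContrib scalar_leaves) with hE
    set pred : String → Bool := fun leaf =>
      PySem.Set.contains (PySem.Set.ofList requested_gql) leaf
        || ((requested_gql.filter (fun p => !(PySem.Set.contains (PySem.Set.ofList scalar_leaves) p))).map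
              (fun p => p ++ ".")).any (fun q => PySem.Str.startswith leaf q) with hpred
    have hnodupS : (PySem.List.sorted (PySem.Set.ofList scalar_leaves) (fun x => x) false).Nodup :=
      (PySem.List.sorted_perm _ _ _).nodup_iff.mpr (PySem.Set.nodup_ofList scalar_leaves)
    have hperm : ((PySem.List.sorted (PySem.Set.ofList scalar_leaves) (fun x => x) false).filter pred).Perm
        (PySem.Set.ofList E) := by
      refine (List.perm_ext_iff_of_nodup (hnodupS.filter pred) (PySem.Set.nodup_ofList E)).mpr ?_
      intro x
      rw [List.mem_filter, PySem.Set.mem_ofList, PySem.List.mem_sorted, PySem.Set.mem_ofList,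
        hE, pvMemExpanded, hpred, pvPredIff]

    have hpl : ((PySem.List.sorted (PySem.Set.ofList scalar_leaves) (fun x => x) false).filter pred).Pairwise
        (fun a b => a < b) :=
      (PySem.List.sorted_ofList_pairwise_lt scalar_leaves).filter pred
    exact PySem.List.sorted_eq_of_perm_of_pairwise_lt _ _ _ hperm hpl
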